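-- pv_equiv track=rewrite | github.com/BenjaminIrwin/compare_diffusion | file_load.py | load_files
-- ===== SOURCE A (Python) =====
-- def get_parameter_value(path, parameter):
--     # Split the path by '/' to get a list of individual components
--     path_components = path.split('/')
--
--     # Find the component that starts with the parameter name followed by '_'
--     for component in path_components:
--         param_prefix = parameter + '_'
--         if component.startswith(param_prefix):
--             # Split the component by '_' and return the second element (the value)
--             # Strip the curly braces from the value
--             return component.replace(param_prefix, '').strip('{}')
--
--     # If the parameter was not found, return None
--     return None
--
-- def load_files(paths, section_param, subsection_param, row_param, column_param):
--     # Create an empty dictionary to store the sections and subsections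
--     sections = {}
--
--     # Iterate through each path in the list
--     for path in paths:
--         # Split the path into a list of components using '/' as the delimiter
--         components = path.split('/')
--
--         # Extract the values for the section, subsection, row, and column parameters
--         section = get_parameter_value(path, section_param)
--         subsection = get_parameter_value(path, subsection_param)
--         row = get_parameter_value(path, row_param)
--         column = get_parameter_value(path, column_param)
--
--         # If the section doesn't already exist in the dictionary, add it
--         if section not in sections:
--             sections[section] = {}
--
--         # If the subsection doesn't already exist in the dictionary, add it
--         if subsection not in sections[section]:
--             sections[section][subsection] = {}
--
--         # If the row doesn't already exist in the subsection, add it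
--         if row not in sections[section][subsection]:
--             sections[section][subsection][row] = {}
--
--         # Add the path to the appropriate row and column in the subsection
--         sections[section][subsection][row][column] = path
--
--     return sections
-- ===== SOURCE B (Python) =====
-- def load_files(paths, section_param, subsection_param, row_param, column_param):
--     # Single pass per path: split once, compute all four parameter values in one
--     # scan over the components, then place the path with a setdefault chain.
--     params = (section_param, subsection_param, row_param, column_param)
--     sections = {}
--     for path in paths:
--         vals = [None, None, None, None]
--         for comp in path.split('/'):
--             for i, param in enumerate(params):
--                 prefix = param + '_'
--                 if vals[i] is None and comp.startswith(prefix):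
--                     vals[i] = comp.replace(prefix, '').strip('{}')
--         sec, sub, row, col = vals
--         sections.setdefault(sec, {}).setdefault(sub, {}).setdefault(row, {})[col] = path
--     return sections
-- ===== Notes on version B (the rewrite author's own statement) =====
-- stated objective: simpler
-- what changed: B splits each path once and computes all four parameter values in a single pass over the components (instead of A's four independent full scans via get_parameter_value), and places the path with a setdefault chain instead of A's three explicit membership-check-then-insert steps.
import Mathlib
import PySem

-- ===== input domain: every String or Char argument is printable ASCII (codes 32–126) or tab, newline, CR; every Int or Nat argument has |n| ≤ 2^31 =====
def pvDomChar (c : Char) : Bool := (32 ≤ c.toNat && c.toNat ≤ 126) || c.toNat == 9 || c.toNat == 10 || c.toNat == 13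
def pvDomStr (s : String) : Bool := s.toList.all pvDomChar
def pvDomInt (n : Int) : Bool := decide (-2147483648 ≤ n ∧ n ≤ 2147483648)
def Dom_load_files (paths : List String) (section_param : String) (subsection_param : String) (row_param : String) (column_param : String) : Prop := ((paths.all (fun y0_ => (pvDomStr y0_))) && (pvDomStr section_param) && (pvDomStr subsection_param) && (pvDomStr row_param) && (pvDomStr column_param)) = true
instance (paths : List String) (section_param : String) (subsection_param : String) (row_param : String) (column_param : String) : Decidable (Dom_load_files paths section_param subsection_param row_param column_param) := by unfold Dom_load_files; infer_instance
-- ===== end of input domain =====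

-- B replaces A's four independent component scans by one pass over the split
-- components computing all four parameter values, and the stepwise
-- membership-check dict building by a setdefault chain (objective: simpler).
-- Both ports build nested PySem.Dicts and render them as nested item lists.

-- shared representation glue: nested dicts rendered as nested association lists
def pvOut (d : PySem.Dict (Option String) (PySem.Dict (Option String) (PySem.Dict (Option String) (PySem.Dict (Option String) String)))) :
    List (Option String × List (Option String × List (Option String × List (Option String × String)))) :=
  d.items.map (fun p1 => (p1.1, p1.2.items.map (fun p2 => (p2.1, p2.2.items.map (fun p3 => (p3.1, p3.2.items))))))

-- ===== PORT A =====
-- get_parameter_value's scan over the components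
def gpvLoop : List String → String → Option String
  | [], _ => none
  | c :: rest, p =>
    let pre := p ++ "_"
    if PySem.Str.startswith c pre then
      some (PySem.Str.stripChars (PySem.Str.replace c pre "") "{}")
    else gpvLoop rest p

def get_parameter_value (path : String) (parameter : String) : Option String :=
  gpvLoop ((PySem.Str.split? path "/").getD []) parameter

def load_files (paths : List String) (section_param : String) (subsection_param : String) (row_param : String) (column_param : String) : List (Option String × List (Option String × List (Option String × List (Option String × String)))) :=
  pvOut (paths.foldl (fun sections path =>
    let sec := get_parameter_value path section_param
    let sub := get_parameter_value path subsection_param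
    let row := get_parameter_value path row_param
    let col := get_parameter_value path column_param
    let sections := if sections.contains sec then sections else sections.insert sec PySem.Dict.empty
    let d1 := sections.getD sec PySem.Dict.empty
    let d1 := if d1.contains sub then d1 else d1.insert sub PySem.Dict.empty
    let d2 := d1.getD sub PySem.Dict.empty
    let d2 := if d2.contains row then d2 else d2.insert row PySem.Dict.empty
    let d3 := d2.getD row PySem.Dict.empty
    let d3 := d3.insert col path
    sections.insert sec (d1.insert sub (d2.insert row d3)))
    PySem.Dict.empty)

-- ===== PORT B =====
-- one step of B's single component pass: fill a slot only if it is still None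
def pvUpd (o : Option String) (comp : String) (param : String) : Option String :=
  match o with
  | some v => some v
  | none =>
    let pre := param ++ "_"
    if PySem.Str.startswith comp pre then
      some (PySem.Str.stripChars (PySem.Str.replace comp pre "") "{}")
    else none

def load_files_alt (paths : List String) (section_param : String) (subsection_param : String) (row_param : String) (column_param : String) : List (Option String × List (Option String × List (Option String × List (Option String × String)))) :=
  pvOut (paths.foldl (fun sections path =>
    let st := ((PySem.Str.split? path "/").getD []).foldl
      (fun st comp =>
        (pvUpd st.1 comp section_param, pvUpd st.2.1 comp subsection_param,
         pvUpd st.2.2.1 comp row_param, pvUpd st.2.2.2 comp column_param))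
      ((none, none, none, none) : Option String × Option String × Option String × Option String)
    sections.modify st.1 PySem.Dict.empty (fun d1 =>
      d1.modify st.2.1 PySem.Dict.empty (fun d2 =>
        d2.modify st.2.2.1 PySem.Dict.empty (fun d3 =>
          d3.insert st.2.2.2 path))))
    PySem.Dict.empty)

-- ===== PRECONDITION & SPEC =====
def Spec_load_files (paths : List String) (section_param : String) (subsection_param : String) (row_param : String) (column_param : String) (out : List (Option String × List (Option String × List (Option String × List (Option String × String))))) : Prop := out = load_files_alt paths section_param subsection_param row_param column_param
instance (paths : List String) (section_param : String) (subsection_param : String) (row_param : String) (column_param : String) (out : List (Option String × List (Option String × List (Option String × List (Option String × String))))) : Decidable (Spec_load_files paths section_param subsection_param row_param column_param out) := by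
  unfold Spec_load_files
  letI i2 : DecidableEq (Option String × List (Option String × String)) := inferInstance
  letI i3 : DecidableEq (Option String × List (Option String × List (Option String × String))) := inferInstance
  letI i4 : DecidableEq (Option String × List (Option String × List (Option String × List (Option String × String)))) := inferInstance
  infer_instance

-- ===== CLAIM (what is proved, stated in full; the proofs are below) =====
def Claim_equal_load_files : Prop := ∀ (paths : List String) (section_param : String) (subsection_param : String) (row_param : String) (column_param : String), Dom_load_files paths section_param subsection_param row_param column_param → Spec_load_files paths section_param subsection_param row_param column_param (load_files paths section_param subsection_param row_param column_param)

-- ===== LEMMAS AND PROOFS =====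

-- a filled slot is never overwritten by B's pass
lemma foldl_pvUpd_some (cs : List String) (p v : String) :
    cs.foldl (fun o c => pvUpd o c p) (some v) = some v := by
  induction cs with
  | nil => rfl
  | cons c cs ih => simpa [pvUpd] using ih

-- B's per-slot pass computes exactly A's first-match scan
lemma foldl_pvUpd_none (cs : List String) (p : String) :
    cs.foldl (fun o c => pvUpd o c p) none = gpvLoop cs p := by
  induction cs with
  | nil => rfl
  | cons c cs ih =>
    simp only [List.foldl_cons, gpvLoop, pvUpd]
    split
    · exact foldl_pvUpd_some cs p _
    · exact ih

-- the componentwise 4-tuple fold splits into four independent folds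
lemma foldl_prod4 (cs : List String) (p1 p2 p3 p4 : String)
    (st : Option String × Option String × Option String × Option String) :
    cs.foldl (fun st comp =>
        (pvUpd st.1 comp p1, pvUpd st.2.1 comp p2,
         pvUpd st.2.2.1 comp p3, pvUpd st.2.2.2 comp p4)) st =
      (cs.foldl (fun o c => pvUpd o c p1) st.1,
       cs.foldl (fun o c => pvUpd o c p2) st.2.1,
       cs.foldl (fun o c => pvUpd o c p3) st.2.2.1,
       cs.foldl (fun o c => pvUpd o c p4) st.2.2.2) := by
  induction cs generalizing st with
  | nil => rfl
  | cons c cs ih => simp [List.foldl_cons, ih]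

-- A's membership-check-then-insert pattern IS Dict.modify with default
lemma ite_insert_eq_modify {κ ν : Type} [BEq κ] [LawfulBEq κ]
    (d : PySem.Dict κ ν) (k : κ) (dflt : ν) (f : ν → ν) :
    (let d' := if d.contains k then d else d.insert k dflt
     d'.insert k (f (d'.getD k dflt))) = d.modify k dflt f := by
  show (if d.contains k then d else d.insert k dflt).insert k
      (f ((if d.contains k then d else d.insert k dflt).getD k dflt)) = _
  by_cases h : d.contains k = true
  · simp [h, PySem.Dict.modify]
  · simp only [h, Bool.false_eq_true, ite_false]
    rw [PySem.Dict.insert_insert_self, PySem.Dict.getD_insert_self]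
    simp [PySem.Dict.modify,
      PySem.Dict.getD_of_not_contains (d := d) (k := k) (d0 := dflt) (by simpa using h)]

-- ===== VERDICT (by name: the statement is the Claim_ definition above) =====
theorem load_files_spec : Claim_equal_load_files := by
  intro paths sp ssp rp cp _
  show _ = _
  unfold load_files load_files_alt
  congr 2
  funext sections path
  simp only [foldl_prod4, foldl_pvUpd_none, get_parameter_value,
    ← ite_insert_eq_modify]
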